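-- pv_equiv track=rewrite | github.com/manwar/perlweeklychallenge-club | challenge-357/packy-anderson/python/ch-1.py | kaprekar_count
-- ===== SOURCE A (Python) =====
-- def sort_digits(digits, reverse=True):
--   return int("".join(sorted(digits, reverse=reverse)))
--
-- def zero_pad(digits):
--   while len(digits) < 4: digits.insert(0, str(0))
--   return digits
--
-- def kaprekar_count(num, count = 0):
--   match num:
--     # sequence doesn't converge
--     case 0: return -1
--
--     # sequence converged in this many iterations
--     case 6174: return count
--
--     case _:
--       digits = zero_pad([ d for d in str(num) ])
--       num1   = sort_digits(digits, reverse=True)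
--       num2   = sort_digits(digits, reverse=False)
--       diff   = num1 - num2
--       return kaprekar_count(diff, count + 1)
-- ===== SOURCE B (Python) =====
-- def kaprekar_count(num, count=0):
--     while num != 0 and num != 6174:
--         s = str(num)
--         asc = ''.join(sorted('0' * (4 - len(s)) + s))
--         num = int(asc[::-1]) - int(asc)
--         count += 1
--     return -1 if num == 0 else count
-- ===== Notes on version B (the rewrite author's own statement) =====
-- stated objective: idiomatic
-- what changed: The tail recursion becomes a flat while loop, the insert(0,...) padding loop becomes a single '0'*(4-len(s))+s pad, and the two reverse-flagged sorts become one ascending sort whose slice-reversal [::-1] gives the descending number.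
-- outside the precondition, e.g. on kaprekar_count(100000, 0): A returns -1, B returns -1
import Mathlib
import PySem

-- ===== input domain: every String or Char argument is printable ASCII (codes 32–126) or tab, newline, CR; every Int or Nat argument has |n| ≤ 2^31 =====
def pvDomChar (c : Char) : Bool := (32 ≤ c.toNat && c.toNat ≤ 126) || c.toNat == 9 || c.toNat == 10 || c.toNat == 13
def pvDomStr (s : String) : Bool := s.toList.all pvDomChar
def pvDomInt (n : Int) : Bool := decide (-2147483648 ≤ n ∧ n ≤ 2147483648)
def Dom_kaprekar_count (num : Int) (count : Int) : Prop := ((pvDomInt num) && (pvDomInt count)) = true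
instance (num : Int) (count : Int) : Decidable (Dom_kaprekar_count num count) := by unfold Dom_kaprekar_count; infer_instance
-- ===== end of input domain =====

-- B replaces A's tail recursion by a flat while loop, the insert-at-front padding loop by a
-- single '0'*(4-len) prefix, and the two reverse-flagged sorts by one sort plus [::-1].

-- ===== PORT A =====
-- sort_digits(digits, reverse): int("".join(sorted(digits, reverse=reverse))).
-- `.getD 0` stands for int()'s ValueError; unreachable on Pre_ (digit strings, no '-').
def pvSortDigits (digits : List Char) (reverse : Bool) : Int :=
  (PySem.Int.ofChars? (PySem.List.sorted digits (fun c => c) reverse)).getD 0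

-- zero_pad: while len(digits) < 4: digits.insert(0, str(0)) — structural fuel form of the
-- while loop (4 iterations suffice: the loop never runs once the length reaches 4)
def pvZeroPadAux : Nat → List Char → List Char
  | 0, digits => digits
  | n + 1, digits => if digits.length < 4 then pvZeroPadAux n ('0' :: digits) else digits

def pvZeroPad (digits : List Char) : List Char := pvZeroPadAux 4 digits

-- A's recursion, with a fuel guard making it total (fallback unreachable on Pre_:
-- every num in [0, 9999] reaches 0 or 6174 within 7 steps, fuel is 20)
def pvGoA : Nat → Int → Int → Int
  | 0, _, count => count
  | fuel + 1, num, count =>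
    if num = 0 then -1
    else if num = 6174 then count
    else
      let digits := pvZeroPad (PySem.Int.toChars num)
      let num1 := pvSortDigits digits true
      let num2 := pvSortDigits digits false
      pvGoA fuel (num1 - num2) (count + 1)

def kaprekar_count (num : Int) (count : Int) : Int := pvGoA 20 num count

-- ===== PORT B =====
-- B's while loop, same fuel guard (fallback unreachable on Pre_).
-- '0' * (4 - len(s)) + s is List.replicate (exact: string repetition then concat);
-- asc[::-1] is PySem.List.slice? … (-1) (never none for step -1, hence `.getD []`);
-- `.getD 0` on the two int() calls stands for ValueError, unreachable on Pre_.
def pvGoB : Nat → Int → Int → Int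
  | 0, _, count => count
  | fuel + 1, num, count =>
    if num ≠ 0 ∧ num ≠ 6174 then
      let s := PySem.Int.toChars num
      let asc := PySem.List.sorted (List.replicate (4 - s.length) '0' ++ s) (fun c => c) false
      let desc := (PySem.List.slice? asc none none (-1)).getD []
      pvGoB fuel ((PySem.Int.ofChars? desc).getD 0 - (PySem.Int.ofChars? asc).getD 0) (count + 1)
    else if num = 0 then -1
    else count

def kaprekar_count_alt (num : Int) (count : Int) : Int := pvGoB 20 num count

-- ===== PRECONDITION & SPEC =====
-- Pre_ excludes num < 0, where A raises ValueError (int() on a digit string with a trailing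
-- '-'), and num > 9999, where the 5-plus-digit sequence need not converge and A in general
-- recurses without bound (RecursionError); a few such inputs happen to reach 0 and return -1,
-- and B returns the same -1 there.
def Pre_kaprekar_count (num : Int) (count : Int) : Prop := 0 ≤ num ∧ num ≤ 9999
instance (num : Int) (count : Int) : Decidable (Pre_kaprekar_count num count) := by
  unfold Pre_kaprekar_count; infer_instance

def pvWitness_kaprekar_count : Int × Int := (495, 0)

def Spec_kaprekar_count (num : Int) (count : Int) (out : Int) : Prop := out = kaprekar_count_alt num count
instance (num : Int) (count : Int) (out : Int) : Decidable (Spec_kaprekar_count num count out) := by unfold Spec_kaprekar_count; infer_instance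

-- ===== CLAIM (what is proved, stated in full; the proofs are below) =====
def Claim_equal_kaprekar_count : Prop := ∀ (num : Int) (count : Int), Dom_kaprekar_count num count → Pre_kaprekar_count num count → Spec_kaprekar_count num count (kaprekar_count num count)

-- ===== LEMMAS AND PROOFS =====

-- A's insert(0, ...)-until-length-4 loop produces exactly the '0'-prefix pad
theorem pvZeroPad_eq (cs : List Char) :
    pvZeroPad cs = List.replicate (4 - cs.length) '0' ++ cs := by
  match cs with
  | [] => rfl
  | [a] => rfl
  | [a, b] => rfl
  | [a, b, c] => rfl
  | a :: b :: c :: d :: tl =>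
    simp [pvZeroPad, pvZeroPadAux]

-- sorted(xs, reverse=True) (stable, key = identity) is the reverse of sorted(xs):
-- both are ≥-sorted rearrangements of xs, and such a list is unique
theorem pvSorted_rev_eq_reverse (cs : List Char) :
    PySem.List.sorted cs (fun c => c) true = (PySem.List.sorted cs (fun c => c) false).reverse := by
  exact ((((PySem.List.sorted_perm cs (fun c => c) true).trans
      (PySem.List.sorted_perm cs (fun c => c) false).symm).trans
      (List.reverse_perm _).symm).eq_of_pairwise
      (fun a b _ _ h1 h2 => le_antisymm h2 h1)
      (PySem.List.sorted_pairwise_rev cs (fun c => c))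
      ((List.pairwise_reverse).mpr (PySem.List.sorted_pairwise cs (fun c => c))))

-- the two loop bodies compute the same next num, for every Int
theorem pvStep_eq (num : Int) :
    pvSortDigits (pvZeroPad (PySem.Int.toChars num)) true
      - pvSortDigits (pvZeroPad (PySem.Int.toChars num)) false
    = (PySem.Int.ofChars? ((PySem.List.slice?
          (PySem.List.sorted
            (List.replicate (4 - (PySem.Int.toChars num).length) '0' ++ PySem.Int.toChars num)
            (fun c => c) false) none none (-1)).getD [])).getD 0
      - (PySem.Int.ofChars? (PySem.List.sorted
          (List.replicate (4 - (PySem.Int.toChars num).length) '0' ++ PySem.Int.toChars num)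
          (fun c => c) false)).getD 0 := by
  rw [← pvZeroPad_eq, PySem.List.slice?_none_none_neg_one, Option.getD_some,
    ← pvSorted_rev_eq_reverse]
  rfl

-- recursion and loop agree at every fuel, num and count
theorem pvGo_eq (fuel : Nat) (num count : Int) :
    pvGoA fuel num count = pvGoB fuel num count := by
  induction fuel generalizing num count with
  | zero => rfl
  | succ fuel ih =>
    by_cases hz : num = 0
    · simp [pvGoA, pvGoB, hz]
    · by_cases hk : num = 6174
      · simp [pvGoA, pvGoB, hk]
      · simp only [pvGoA, pvGoB, if_neg hz, if_neg hk, if_pos (And.intro hz hk)]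
        rw [pvStep_eq num]
        exact ih _ _

-- ===== VERDICT (by name: the statement is the Claim_ definition above) =====
theorem kaprekar_count_spec : Claim_equal_kaprekar_count := by
  intro num count _ _
  unfold Spec_kaprekar_count kaprekar_count kaprekar_count_alt
  exact pvGo_eq 20 num count
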